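-- pv_equiv track=rewrite | github.com/SayakaMiura/BEAM | BEAMfast/Functions3.py | GetBestMatSeq
-- ===== SOURCE A (Python) =====
-- def CountDifNum_RmMiss(Seq0,Seq1):
--             Len=len(Seq0)
--
--             Dif=0
--             c=0
--             if len(Seq0)!=len(Seq1):
--                 print ('skipped',Seq0,Seq1,len(Seq0),len(Seq1))
--                 return(9999999999999999999999999999999999999)
--             else:
--              while c<Len:
--                 if Seq0[c]!=Seq1[c] and Seq0[c]!='?' and Seq1[c]!='?': Dif+=1
--                 c+=1
--              return Dif
--
-- def GetBestMatSeq(THVarSeqDic,CellSeq):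
--
--         Dif2THls={}
--         for TH in THVarSeqDic:
--             C=CountDifNum_RmMiss(CellSeq,THVarSeqDic[TH])
--             Dif2THls[C]=Dif2THls.get(C,[])+[TH]
--         DifLs=list(Dif2THls.keys())
--         DifLs.sort()
--
--         BestLs=Dif2THls[DifLs[0]]
--         Dic={}
--         for B in BestLs:
--             Dic[B]=THVarSeqDic[B]
--         return BestLs,Dic
-- ===== SOURCE B (Python) =====
-- def CountDifNum_RmMiss(Seq0,Seq1):
--             Len=len(Seq0)
--
--             Dif=0
--             c=0
--             if len(Seq0)!=len(Seq1):
--                 print ('skipped',Seq0,Seq1,len(Seq0),len(Seq1))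
--                 return(9999999999999999999999999999999999999)
--             else:
--              while c<Len:
--                 if Seq0[c]!=Seq1[c] and Seq0[c]!='?' and Seq1[c]!='?': Dif+=1
--                 c+=1
--              return Dif
--
-- def GetBestMatSeq(THVarSeqDic, CellSeq):
--     # single pass: maintain the running minimum count and the list of keys achieving it
--     best = None
--     BestLs = []
--     for TH in THVarSeqDic:
--         c = CountDifNum_RmMiss(CellSeq, THVarSeqDic[TH])
--         if best is None or c < best:
--             best = c
--             BestLs = [TH]
--         elif c == best:
--             BestLs.append(TH)
--     Dic = dict((B, THVarSeqDic[B]) for B in BestLs)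
--     return BestLs, Dic
-- ===== Notes on version B (the rewrite author's own statement) =====
-- stated objective: alternative
-- what changed: Replaces A's count->key-list inverted dict (which re-copies the per-count key list on every insertion) plus key sort plus head lookup with a single running-minimum pass that keeps the best count and appends the keys attaining it, in original order.
import Mathlib
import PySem

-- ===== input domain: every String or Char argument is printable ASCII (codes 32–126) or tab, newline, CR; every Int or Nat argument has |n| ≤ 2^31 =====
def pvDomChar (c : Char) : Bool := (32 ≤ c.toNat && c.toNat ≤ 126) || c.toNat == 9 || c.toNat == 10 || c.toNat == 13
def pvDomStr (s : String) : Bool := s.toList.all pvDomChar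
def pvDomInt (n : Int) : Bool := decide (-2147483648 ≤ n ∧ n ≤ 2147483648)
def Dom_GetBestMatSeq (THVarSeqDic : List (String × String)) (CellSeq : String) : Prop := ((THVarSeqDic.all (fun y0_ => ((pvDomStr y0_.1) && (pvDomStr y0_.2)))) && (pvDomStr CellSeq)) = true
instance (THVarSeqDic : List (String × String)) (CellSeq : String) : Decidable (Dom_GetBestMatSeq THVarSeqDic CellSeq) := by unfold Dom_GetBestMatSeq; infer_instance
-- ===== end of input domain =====

-- B replaces A's count→key-list inverted dict + key sort + head lookup with a single
-- running-minimum pass keeping the best count and the ordered list of keys attaining it (objective: alternative).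

-- ===== PORT A =====
-- shared helper, identical in Source A and Source B ('while c<Len' ported as a fold over range(0,Len);
-- the pyGetD default is never used: c is always in range since the lengths are equal on that branch)
def CountDifNum_RmMiss (Seq0 Seq1 : String) : Int :=
  let s0 := Seq0.toList
  let s1 := Seq1.toList
  if s0.length ≠ s1.length then 9999999999999999999999999999999999999
  else
    (PySem.List.pyRange 0 (s0.length : Int) 1).foldl
      (fun Dif c =>
        if PySem.List.pyGetD s0 c '?' ≠ PySem.List.pyGetD s1 c '?'
            ∧ PySem.List.pyGetD s0 c '?' ≠ '?' ∧ PySem.List.pyGetD s1 c '?' ≠ '?'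
        then Dif + 1 else Dif) 0

def GetBestMatSeq (THVarSeqDic : List (String × String)) (CellSeq : String) : List String × (List (String × String)) :=
  let d : PySem.Dict String String := PySem.Dict.ofList THVarSeqDic
  let Dif2THls : PySem.Dict Int (List String) :=
    d.keys.foldl
      (fun m TH =>
        let C := CountDifNum_RmMiss CellSeq (d.getD TH "")
        m.insert C (m.getD C [] ++ [TH])) PySem.Dict.empty
  let DifLs := PySem.List.sorted Dif2THls.keys (fun x => x) false
  match PySem.List.pyGet? DifLs 0 with
  | none => ([], [])
  | some k0 =>
    let BestLs := Dif2THls.getD k0 []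
    let Dic : PySem.Dict String String :=
      BestLs.foldl (fun dc B => dc.insert B (d.getD B "")) PySem.Dict.empty
    (BestLs, Dic.items)

-- ===== PORT B =====
-- the body of B's for-loop: 'if best is None or c < best: best, BestLs = c, [TH]  elif c == best: BestLs.append(TH)'
def pvStepB (f : String → Int) (acc : Option Int × List String) (TH : String) : Option Int × List String :=
  let c := f TH
  match acc.1 with
  | none => (some c, [TH])
  | some best =>
    if c < best then (some c, [TH])
    else if c = best then (some best, acc.2 ++ [TH])
    else acc

def GetBestMatSeq_alt (THVarSeqDic : List (String × String)) (CellSeq : String) : List String × (List (String × String)) :=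
  let d : PySem.Dict String String := PySem.Dict.ofList THVarSeqDic
  -- single running-minimum pass over the dict's keys
  let st := d.keys.foldl (pvStepB (fun TH => CountDifNum_RmMiss CellSeq (d.getD TH ""))) (none, [])
  let BestLs := st.2
  -- 'Dic = dict((B, THVarSeqDic[B]) for B in BestLs)'
  let Dic : PySem.Dict String String := PySem.Dict.ofList (BestLs.map (fun B => (B, d.getD B "")))
  (BestLs, Dic.items)

-- ===== PRECONDITION & SPEC =====
-- The empty dict is excluded: there A raises IndexError (DifLs[0]); B's loop never runs and it returns ([], {}).
def Pre_GetBestMatSeq (THVarSeqDic : List (String × String)) (CellSeq : String) : Prop := THVarSeqDic ≠ []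
instance (THVarSeqDic : List (String × String)) (CellSeq : String) : Decidable (Pre_GetBestMatSeq THVarSeqDic CellSeq) := by unfold Pre_GetBestMatSeq; infer_instance
def pvWitness_GetBestMatSeq : (List (String × String)) × String := ([("a", "ab"), ("b", "bb")], "bb")

def Spec_GetBestMatSeq (THVarSeqDic : List (String × String)) (CellSeq : String) (out : List String × (List (String × String))) : Prop := out = GetBestMatSeq_alt THVarSeqDic CellSeq
instance (THVarSeqDic : List (String × String)) (CellSeq : String) (out : List String × (List (String × String))) : Decidable (Spec_GetBestMatSeq THVarSeqDic CellSeq out) := by unfold Spec_GetBestMatSeq; infer_instance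

-- ===== CLAIM (what is proved, stated in full; the proofs are below) =====
def Claim_equal_GetBestMatSeq : Prop := ∀ (THVarSeqDic : List (String × String)) (CellSeq : String), Dom_GetBestMatSeq THVarSeqDic CellSeq → Pre_GetBestMatSeq THVarSeqDic CellSeq → Spec_GetBestMatSeq THVarSeqDic CellSeq (GetBestMatSeq THVarSeqDic CellSeq)

-- ===== LEMMAS AND PROOFS =====

-- A's grouping loop: the list stored under count c is exactly the keys with count c, in order.
lemma groupD (f : String → Int) (ks : List String) (m : PySem.Dict Int (List String)) (c : Int) :
    (ks.foldl (fun m TH => m.insert (f TH) (m.getD (f TH) [] ++ [TH])) m).getD c []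
    = m.getD c [] ++ ks.filter (fun k => f k == c) := by
  induction ks generalizing m with
  | nil => simp
  | cons k t ih =>
    simp only [List.foldl_cons, List.filter_cons, ih, PySem.Dict.getD_insert]
    by_cases h : c = f k
    · simp [h]
    · simp [h, Ne.symm h]

-- the first element of a Python-sorted Int list is a minimum of the list
lemma sorted_head_min (s : List Int) (hs : s ≠ []) :
    ∃ k0, PySem.List.pyGet? (PySem.List.sorted s (fun x => x) false) 0 = some k0
      ∧ k0 ∈ s ∧ ∀ y ∈ s, k0 ≤ y := by
  have hl : PySem.List.sorted s (fun x => x) false ≠ [] := by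
    simpa [PySem.List.sorted_eq_nil_iff] using hs
  have hlen : 0 < (PySem.List.sorted s (fun x => x) false).length := List.length_pos_iff.mpr hl
  refine ⟨(PySem.List.sorted s (fun x => x) false)[0], ?_, ?_, ?_⟩
  · have h0 := PySem.List.pyGet?_natCast (PySem.List.sorted s (fun x => x) false) 0
    simp only [Nat.cast_zero] at h0
    rw [h0, List.getElem?_eq_getElem hlen]
  · exact (PySem.List.sorted_perm s (fun x => x) false).mem_iff.mp (List.getElem_mem hlen)
  · intro y hy
    have hy' : y ∈ PySem.List.sorted s (fun x => x) false :=
      (PySem.List.sorted_perm s (fun x => x) false).mem_iff.mpr hy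
    obtain ⟨q, hq, rfl⟩ := List.mem_iff_getElem.mp hy'
    exact PySem.List.sorted_id_getElem_mono _ (Nat.zero_le q) hq

-- a dict built from a nonempty pair list has a nonempty key list
lemma keys_ofList_ne (L : List (String × String)) (h : L ≠ []) :
    (PySem.Dict.ofList L : PySem.Dict String String).keys ≠ [] := by
  have he : (PySem.Dict.ofList L : PySem.Dict String String).keys
      = PySem.Set.ofList (L.map (fun p => p.1)) :=
    PySem.Dict.keys_foldl_insert_key L (fun p => p.1) (fun _ p => p.2) PySem.Dict.empty
  intro hnil
  obtain ⟨p, t, rfl⟩ := List.exists_cons_of_ne_nil h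
  have : p.1 ∈ (PySem.Dict.ofList ((p :: t)) : PySem.Dict String String).keys := by
    rw [he]
    exact (PySem.Set.mem_ofList _ _).mpr (by simp)
  rw [hnil] at this
  exact (List.not_mem_nil) this

-- the running minimum of f over t starting at b
def runMin (f : String → Int) (b : Int) (t : List String) : Int :=
  t.foldl (fun a k => min a (f k)) b

lemma runMin_le_base (f : String → Int) (t : List String) (b : Int) : runMin f b t ≤ b := by
  induction t generalizing b with
  | nil => simp [runMin]
  | cons k t ih =>
    calc runMin f b (k :: t) = runMin f (min b (f k)) t := rfl
    _ ≤ min b (f k) := ih _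
    _ ≤ b := min_le_left _ _

lemma runMin_le_mem (f : String → Int) (t : List String) (b : Int) :
    ∀ y ∈ t, runMin f b t ≤ f y := by
  induction t generalizing b with
  | nil => simp
  | cons k t ih =>
    intro y hy
    rcases List.mem_cons.mp hy with rfl | hy
    · exact le_trans (runMin_le_base f t _) (min_le_right _ _)
    · exact ih _ y hy

lemma runMin_mem (f : String → Int) (t : List String) (b : Int) :
    runMin f b t = b ∨ ∃ y ∈ t, runMin f b t = f y := by
  induction t generalizing b with
  | nil => simp [runMin]
  | cons k t ih =>
    rcases ih (min b (f k)) with h | ⟨y, hy, h⟩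
    · rcases min_choice b (f k) with hm | hm
      · exact Or.inl (by simpa [runMin, hm] using h)
      · exact Or.inr ⟨k, List.mem_cons_self, by simpa [runMin, hm] using h⟩
    · exact Or.inr ⟨y, List.mem_cons_of_mem _ hy, h⟩

-- the three shapes of B's loop step on a some-state
lemma stepB_lt (f : String → Int) (b : Int) (l : List String) (k : String) (h : f k < b) :
    pvStepB f (some b, l) k = (some (f k), [k]) := by
  simp [pvStepB, h]

lemma stepB_eq (f : String → Int) (b : Int) (l : List String) (k : String) (h : f k = b) :
    pvStepB f (some b, l) k = (some b, l ++ [k]) := by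
  simp [pvStepB, h]

lemma stepB_gt (f : String → Int) (b : Int) (l : List String) (k : String) (h : b < f k) :
    pvStepB f (some b, l) k = (some b, l) := by
  simp [pvStepB, not_lt.mpr h.le, ne_of_gt h]

-- B's running-minimum loop, characterised: from state (some b, l) it ends at the minimum and its keys
lemma runLoop (f : String → Int) (t : List String) (b : Int) (l : List String) :
    t.foldl (pvStepB f) (some b, l)
    = (some (runMin f b t),
       (if runMin f b t = b then l else []) ++ t.filter (fun k => f k == runMin f b t)) := by
  induction t generalizing b l with
  | nil => simp [runMin]
  | cons k t ih =>
    have hM : runMin f b (k :: t) = runMin f (min b (f k)) t := rfl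
    rcases lt_trichotomy (f k) b with hlt | heq | hgt
    · have hmin : min b (f k) = f k := min_eq_right hlt.le
      have hMlt : runMin f (f k) t < b := lt_of_le_of_lt (runMin_le_base f t _) hlt
      rw [List.foldl_cons, stepB_lt f b l k hlt, ih, hM, hmin,
        if_neg (ne_of_lt hMlt), List.filter_cons, List.nil_append]
      by_cases hk : f k = runMin f (f k) t
      · rw [if_pos hk.symm, if_pos (by simpa using hk), List.singleton_append]
      · rw [if_neg (fun h => hk h.symm), if_neg (by simpa using hk), List.nil_append]
    · subst heq
      rw [List.foldl_cons, stepB_eq f (f k) l k rfl, ih, hM, min_self, List.filter_cons]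
      by_cases hMb : runMin f (f k) t = f k
      · rw [if_pos hMb, if_pos hMb, if_pos (by simpa using hMb.symm)]
        simp
      · rw [if_neg hMb, if_neg hMb, if_neg (by simpa using fun h => hMb h.symm)]
    · have hmin : min b (f k) = b := min_eq_left hgt.le
      have hlt2 : runMin f b t < f k := lt_of_le_of_lt (runMin_le_base f t b) hgt
      have hcond : ¬ ((f k == runMin f b t) = true) := by
        simp only [beq_iff_eq]
        exact ne_of_gt hlt2
      rw [List.foldl_cons, stepB_gt f b l k hgt, ih, hM, hmin, List.filter_cons, if_neg hcond]

-- B's whole loop over a nonempty key list: the minimum plus the keys attaining it, in order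
lemma runLoop_top (f : String → Int) (k : String) (t : List String) :
    (k :: t).foldl (pvStepB f) (none, [])
    = (some (runMin f (f k) t), (k :: t).filter (fun x => f x == runMin f (f k) t)) := by
  have h0 : pvStepB f (none, []) k = (some (f k), [k]) := rfl
  rw [List.foldl_cons, h0, runLoop, List.filter_cons]
  by_cases hk : runMin f (f k) t = f k
  · rw [if_pos hk, if_pos (by simpa using hk.symm), List.singleton_append]
  · rw [if_neg hk, if_neg (by simpa using fun h => hk h.symm), List.nil_append]

-- the whole bodies agree, for any count function f and any nonempty dict
lemma selectEq (d : PySem.Dict String String) (f : String → Int) (hne : d.keys ≠ []) :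
    (match PySem.List.pyGet? (PySem.List.sorted
        (d.keys.foldl (fun (m : PySem.Dict Int (List String)) TH =>
            m.insert (f TH) (m.getD (f TH) [] ++ [TH])) PySem.Dict.empty).keys (fun x => x) false) 0 with
     | none => (([] : List String), ([] : List (String × String)))
     | some k0 =>
       ((d.keys.foldl (fun (m : PySem.Dict Int (List String)) TH =>
            m.insert (f TH) (m.getD (f TH) [] ++ [TH])) PySem.Dict.empty).getD k0 [],
        (((d.keys.foldl (fun (m : PySem.Dict Int (List String)) TH =>
              m.insert (f TH) (m.getD (f TH) [] ++ [TH])) PySem.Dict.empty).getD k0 []).foldl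
          (fun (dc : PySem.Dict String String) B => dc.insert B (d.getD B "")) PySem.Dict.empty).items))
    = ((d.keys.foldl (pvStepB f) (none, [])).2,
       (PySem.Dict.ofList (((d.keys.foldl (pvStepB f) (none, [])).2).map
          (fun B => (B, d.getD B "")))).items) := by
  obtain ⟨k, t, hks⟩ := List.exists_cons_of_ne_nil hne
  have hkeys : (d.keys.foldl (fun m TH => m.insert (f TH) (m.getD (f TH) [] ++ [TH]))
      (PySem.Dict.empty : PySem.Dict Int (List String))).keys
      = PySem.Set.ofList (d.keys.map f) :=
    PySem.Dict.keys_foldl_insert_key d.keys f (fun m x => m.getD (f x) [] ++ [x]) PySem.Dict.empty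
  have hsne : PySem.Set.ofList (d.keys.map f) ≠ [] := by
    intro h0
    have : f k ∈ PySem.Set.ofList (d.keys.map f) :=
      (PySem.Set.mem_ofList _ _).mpr (by rw [hks]; simp)
    rw [h0] at this; exact List.not_mem_nil this
  obtain ⟨k0, hget, hk0mem, hk0min⟩ := sorted_head_min (PySem.Set.ofList (d.keys.map f)) hsne
  have hB := runLoop_top f k t
  -- k0 = the running minimum: both are the least value of f on the keys
  have hk0M : k0 = runMin f (f k) t := by
    apply le_antisymm
    · have hMmem : runMin f (f k) t ∈ d.keys.map f := by
        rcases runMin_mem f t (f k) with h | ⟨y, hy, h⟩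
        · exact List.mem_map.mpr ⟨k, by rw [hks]; exact List.mem_cons_self, h.symm⟩
        · exact List.mem_map.mpr ⟨y, by rw [hks]; exact List.mem_cons_of_mem _ hy, h.symm⟩
      exact hk0min _ ((PySem.Set.mem_ofList _ _).mpr hMmem)
    · obtain ⟨y, hy, rfl⟩ := List.mem_map.mp ((PySem.Set.mem_ofList _ _).mp hk0mem)
      rw [hks] at hy
      rcases List.mem_cons.mp hy with rfl | hy
      · exact runMin_le_base f t _
      · exact runMin_le_mem f t (f k) y hy
  have hBest : (d.keys.foldl (fun m TH => m.insert (f TH) (m.getD (f TH) [] ++ [TH]))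
      (PySem.Dict.empty : PySem.Dict Int (List String))).getD k0 []
      = d.keys.filter (fun x => f x == runMin f (f k) t) := by
    rw [groupD, PySem.Dict.getD_empty, List.nil_append, hk0M]
  rw [hkeys, hget]
  dsimp only
  have hB' : (d.keys.foldl (pvStepB f) (none, [])).2
      = d.keys.filter (fun x => f x == runMin f (f k) t) := by
    rw [hks, hB]
  rw [hBest, hB']
  -- the dict comprehension equals A's insert loop
  congr 1
  simp [PySem.Dict.ofList, PySem.Dict.update, List.foldl_map]

-- ===== VERDICT (by name: the statement is the Claim_ definition above) =====
theorem GetBestMatSeq_spec : Claim_equal_GetBestMatSeq := by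
  intro THVarSeqDic CellSeq _hdom hpre
  exact selectEq (PySem.Dict.ofList THVarSeqDic)
    (fun TH => CountDifNum_RmMiss CellSeq ((PySem.Dict.ofList THVarSeqDic : PySem.Dict String String).getD TH ""))
    (keys_ofList_ne THVarSeqDic hpre)
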